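-- pv_equiv track=rewrite | github.com/MarcHoog/WebshopSyncCLI | syncly/utils.py | normalize_env_var
-- ===== SOURCE A (Python) =====
-- def normalize_env_var(name: str) -> str:
--     """
--     Normalize a string to a valid environment variable format.
--     """
--     result = []
--     prev_was_sep = False
--     for char in name.strip():
--         if char in {' ', '-'}:
--             if not prev_was_sep:
--                 result.append('_')
--                 prev_was_sep = True
--         elif char.isalnum() or char == '_':
--             result.append(char)
--             prev_was_sep = False
--
--     normalized = ''.join(result)
--     # Ensure it starts with a letter or underscore
--     if normalized:
--         if not normalized[0].isalpha() or normalized[0] == '_':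
--             normalized = '_' + normalized
--     return normalized.upper()
-- ===== SOURCE B (Python) =====
-- def normalize_env_var(name: str) -> str:
--     """
--     Normalize a string to a valid environment variable format.
--
--     Two-pass approach: first drop every character that is neither
--     alphanumeric, underscore, space nor dash; then collapse each run of
--     spaces/dashes into a single underscore (underscore runs are kept).
--     """
--     s = ''.join(c for c in name.strip() if c.isalnum() or c in '_ -')
--     parts = []
--     i = 0
--     n = len(s)
--     while i < n:
--         if s[i] in ' -':
--             parts.append('_')
--             while i < n and s[i] in ' -':
--                 i += 1
--         else:
--             parts.append(s[i])
--             i += 1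
--     res = ''.join(parts)
--     if res and (res[0] == '_' or not res[0].isalpha()):
--         res = '_' + res
--     return res.upper()
-- ===== Notes on version B (the rewrite author's own statement) =====
-- stated objective: alternative
-- what changed: Replaced the single stateful loop with a prev_was_sep flag by a two-pass pipeline: filter out invalid characters first, then collapse each run of spaces/dashes into one underscore by skipping the run with an inner index loop.
import Mathlib
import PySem

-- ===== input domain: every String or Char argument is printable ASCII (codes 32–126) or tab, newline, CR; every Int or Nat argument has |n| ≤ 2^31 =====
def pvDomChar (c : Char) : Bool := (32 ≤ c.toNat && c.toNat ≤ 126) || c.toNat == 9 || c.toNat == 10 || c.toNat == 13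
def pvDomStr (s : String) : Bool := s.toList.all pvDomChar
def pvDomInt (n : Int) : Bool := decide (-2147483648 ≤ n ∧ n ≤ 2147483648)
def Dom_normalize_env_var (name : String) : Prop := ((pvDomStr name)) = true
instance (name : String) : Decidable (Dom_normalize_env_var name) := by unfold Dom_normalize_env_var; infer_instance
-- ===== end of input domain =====

-- B replaces A's single stateful loop (prev_was_sep flag) by a two-pass pipeline:
-- filter invalid characters, then collapse runs of spaces/dashes; same O(n) cost.


-- ===== PORT A =====
-- A's loop over name.strip() with state (result, prev_was_sep), as structural recursion
def pvAGo : List Char → Bool → List Char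
  | [], _ => []
  | c :: rest, prev =>
    if c == ' ' || c == '-' then
      if !prev then '_' :: pvAGo rest true else pvAGo rest true
    else if PySem.Chars.isalnum c || c == '_' then c :: pvAGo rest false
    else pvAGo rest prev

def normalize_env_var (name : String) : String :=
  let normalized := pvAGo (PySem.Chars.strip name.toList) false
  let normalized :=
    match normalized with
    | [] => normalized
    | c :: _ => if !(PySem.Chars.isalpha c) || c == '_' then '_' :: normalized else normalized
  String.ofList (PySem.Chars.upper normalized)

-- ===== PORT B =====
-- B's run-collapsing while loop: the inner 'while' that skips a run is dropWhile
def pvBCollapse : List Char → List Char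
  | [] => []
  | c :: rest =>
    if c == ' ' || c == '-' then
      '_' :: pvBCollapse (rest.dropWhile (fun d => d == ' ' || d == '-'))
    else c :: pvBCollapse rest
  termination_by cs => cs.length
  decreasing_by
  · exact Nat.lt_succ_of_le (List.length_dropWhile_le _ _)
  · exact Nat.lt_succ_self _

def normalize_env_var_alt (name : String) : String :=
  let s := (PySem.Chars.strip name.toList).filter
      (fun c => PySem.Chars.isalnum c || c == '_' || c == ' ' || c == '-')
  let res := pvBCollapse s
  let res :=
    match res with
    | [] => res
    | c :: _ => if c == '_' || !(PySem.Chars.isalpha c) then '_' :: res else res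
  String.ofList (PySem.Chars.upper res)

-- ===== PRECONDITION & SPEC =====
def Spec_normalize_env_var (name : String) (out : String) : Prop := out = normalize_env_var_alt name
instance (name : String) (out : String) : Decidable (Spec_normalize_env_var name out) := by unfold Spec_normalize_env_var; infer_instance

-- ===== CLAIM (what is proved, stated in full; the proofs are below) =====
def Claim_equal_normalize_env_var : Prop := ∀ (name : String), Dom_normalize_env_var name → Spec_normalize_env_var name (normalize_env_var name)

-- ===== LEMMAS AND PROOFS =====

-- dropped characters do not change A's loop state, so filtering them first is sound
theorem pvAGo_filter (cs : List Char) (prev : Bool) :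
    pvAGo cs prev =
      pvAGo (cs.filter (fun c => PySem.Chars.isalnum c || c == '_' || c == ' ' || c == '-')) prev := by
  induction cs generalizing prev with
  | nil => rfl
  | cons c rest ih =>
    by_cases hs : (c == ' ' || c == '-') = true
    · have hf : (PySem.Chars.isalnum c || c == '_' || c == ' ' || c == '-') = true := by
        rcases Bool.or_eq_true_iff.mp hs with h | h <;> simp [h]
      simp [pvAGo, hf, hs, ih]
    · rw [Bool.not_eq_true] at hs
      by_cases hk : (PySem.Chars.isalnum c || c == '_') = true
      · have hf : (PySem.Chars.isalnum c || c == '_' || c == ' ' || c == '-') = true := by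
          rcases Bool.or_eq_true_iff.mp hk with h | h <;> simp [h]
        simp [pvAGo, hs, hk, ih]
      · rw [Bool.not_eq_true] at hk
        have hf : (PySem.Chars.isalnum c || c == '_' || c == ' ' || c == '-') = false := by
          rcases Bool.or_eq_false_iff.mp hs with ⟨h1, h2⟩
          rcases Bool.or_eq_false_iff.mp hk with ⟨h3, h4⟩
          simp [h1, h2, h3, h4]
        simp [pvAGo, hs, hk, ih]

-- on a list containing only kept characters, A's loop equals B's run-collapse,
-- where the flag 'true' corresponds to still being inside a separator run
theorem pvAGo_eq_collapse (cs : List Char)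
    (h : ∀ c ∈ cs, (PySem.Chars.isalnum c || c == '_' || c == ' ' || c == '-') = true) :
    pvAGo cs false = pvBCollapse cs ∧
      pvAGo cs true = pvBCollapse (cs.dropWhile (fun d => d == ' ' || d == '-')) := by
  induction cs with
  | nil => exact ⟨by simp [pvAGo, pvBCollapse], by simp [pvAGo, pvBCollapse]⟩
  | cons c rest ih =>
    have hrest := ih (fun d hd => h d (List.mem_cons_of_mem _ hd))
    by_cases hs : (c == ' ' || c == '-') = true
    · refine ⟨?_, ?_⟩
      · simp [pvAGo, pvBCollapse, hs, hrest.2]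
      · simp [pvAGo, hs, hrest.2]
    · rw [Bool.not_eq_true] at hs
      have hk : (PySem.Chars.isalnum c || c == '_') = true := by
        have hc := h c List.mem_cons_self
        rcases Bool.or_eq_false_iff.mp hs with ⟨h1, h2⟩
        simpa [h1, h2] using hc
      refine ⟨?_, ?_⟩
      · simp [pvAGo, pvBCollapse, hs, hk, hrest.1]
      · simp [pvAGo, pvBCollapse, hs, hk, hrest.1]

-- A's kept character list equals B's filtered-and-collapsed list
theorem pv_core_eq (cs : List Char) :
    pvAGo cs false =
      pvBCollapse (cs.filter (fun c => PySem.Chars.isalnum c || c == '_' || c == ' ' || c == '-')) := by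
  rw [pvAGo_filter]
  exact (pvAGo_eq_collapse _ (fun c hc => (List.mem_filter.mp hc).2)).1

-- ===== VERDICT (by name: the statement is the Claim_ definition above) =====
theorem normalize_env_var_spec : Claim_equal_normalize_env_var := by
  intro name _
  unfold Spec_normalize_env_var normalize_env_var normalize_env_var_alt
  simp only [pv_core_eq]
  generalize pvBCollapse ((PySem.Chars.strip name.toList).filter
      (fun c => PySem.Chars.isalnum c || c == '_' || c == ' ' || c == '-')) = L
  cases L with
  | nil => simp
  | cons c rest =>
    cases h1 : PySem.Chars.isalpha c <;> cases h2 : c == '_' <;> simp [h1, h2]
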